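-- pv_equiv track=rewrite | github.com/ML-KULeuven/KBC-as-PU-Learning | kbc_pul/experiments_utils/datasets/data_cleaning_helper.py | tokenize_line_with_angle_brackets
-- ===== SOURCE A (Python) =====
-- from typing import List, Set
--
-- def tokenize_line_with_angle_brackets(line) -> List[str]:
--     tokens = []
--
--     current_start = 0
--     is_opened = False
--     for i in range(len(line)):
--         if line[i] == "<":
--             if is_opened:
--                 raise Exception("Found < when already reading token; nesting not supported.")
--             else:
--                 is_opened = True
--                 current_start = i + 1
--         if line[i] == ">":
--             if not is_opened:
--                 raise Exception("Found > when not reading token; something went wrong.")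
--             else:
--                 is_opened = False
--                 token = line[current_start:i]
--                 tokens.append(token)
--     return tokens
-- ===== SOURCE B (Python) =====
-- def tokenize_line_with_angle_brackets(line):
--     tokens = []
--     rest = line
--     while True:
--         _before, sep, rest = rest.partition("<")
--         if not sep:
--             return tokens
--         tok, sep, rest = rest.partition(">")
--         if not sep:
--             return tokens
--         tokens.append(tok)
-- ===== Notes on version B (the rewrite author's own statement) =====
-- stated objective: faster
-- what changed: B replaces A's per-character Python loop with an open/closed flag and start index by repeatedly splitting the remaining string with str.partition at the next opening and closing angle bracket, appending the piece between them (delimiter search runs in C).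
-- outside the precondition, e.g. on tokenize_line_with_angle_brackets('>'): A raises Exception, B returns []
import Mathlib
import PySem

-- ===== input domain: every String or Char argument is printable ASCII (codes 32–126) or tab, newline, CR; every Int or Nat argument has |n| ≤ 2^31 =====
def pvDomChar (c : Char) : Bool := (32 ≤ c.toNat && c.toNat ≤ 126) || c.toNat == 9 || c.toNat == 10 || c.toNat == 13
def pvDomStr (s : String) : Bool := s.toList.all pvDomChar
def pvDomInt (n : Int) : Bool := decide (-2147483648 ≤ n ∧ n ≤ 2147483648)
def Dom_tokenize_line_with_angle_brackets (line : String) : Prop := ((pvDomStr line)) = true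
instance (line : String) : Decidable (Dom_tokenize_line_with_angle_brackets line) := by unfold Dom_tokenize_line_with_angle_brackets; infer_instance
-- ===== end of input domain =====

-- B replaces A's per-character flag/index loop by repeated delimiter splitting (str.partition);
-- same return value wherever A returns; A raises on malformed bracket sequences (excluded by Pre_),
-- where B returns the tokens completed so far.

-- ===== PORT A =====
-- loop body; state (tokens, current_start, is_opened); raising modelled as `none` (reached only outside Pre_)
def tokAStep (cs : List Char) (st : Option (List String × Int × Bool)) (i : Int) :
    Option (List String × Int × Bool) :=
  match st with
  | none => none
  | some (tokens, current_start, is_opened) =>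
    let c := PySem.List.pyGetD cs i ' '
    -- if line[i] == "<"
    let st1 : Option (List String × Int × Bool) :=
      if c = '<' then
        if is_opened then none  -- raise: nesting not supported
        else some (tokens, i + 1, true)
      else some (tokens, current_start, is_opened)
    match st1 with
    | none => none
    | some (tokens1, cur1, opened1) =>
      -- if line[i] == ">"
      if c = '>' then
        if !opened1 then none  -- raise: > when not reading token
        else some (tokens1 ++ [String.ofList (PySem.List.slice cs (some cur1) (some i))], cur1, false)
      else some (tokens1, cur1, opened1)

def tokenize_line_with_angle_brackets (line : String) : List String :=
  let cs := line.toList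
  match (PySem.List.pyRange 0 (cs.length : Int) 1).foldl (tokAStep cs) (some ([], 0, false)) with
  | some (tokens, _, _) => tokens
  | none => []  -- exception case, excluded by Pre_

-- ===== PORT B =====
-- transliteration of Source B's while-loop: repeatedly partition on '<' then '>'
-- (str.partition = span at the first delimiter); the fuel argument only makes the loop
-- structurally total — each pass consumes at least two characters, so length+1 never runs out.
def tokBGo : Nat → List Char → List String
  | 0, _ => []
  | fuel + 1, cs =>
    match cs.dropWhile (· ≠ '<') with
    | [] => []
    | _ :: after =>
      match after.dropWhile (· ≠ '>') with
      | [] => []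
      | _ :: after2 =>
        String.ofList (after.takeWhile (· ≠ '>')) :: tokBGo fuel after2

def tokenize_line_with_angle_brackets_alt (line : String) : List String :=
  tokBGo (line.toList.length + 1) line.toList

-- ===== PRECONDITION & SPEC =====
def pvIsBr (c : Char) : Bool := c == '<' || c == '>'

-- pvAltChain nxt bs: bs is the strict alternation '<','>','<','>',… (starting with '>' iff nxt)
def pvAltChain : Bool → List Char → Bool
  | _, [] => true
  | nxt, c :: rest => (c == (if nxt then '>' else '<')) && pvAltChain (!nxt) rest

-- Pre_ excludes exactly the inputs on which A raises an Exception (a '>' with no preceding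
-- unmatched '<', or a '<' inside an open token): the bracket characters of the line must
-- strictly alternate starting with '<'.
def Pre_tokenize_line_with_angle_brackets (line : String) : Prop :=
  pvAltChain false (line.toList.filter pvIsBr) = true
instance (line : String) : Decidable (Pre_tokenize_line_with_angle_brackets line) := by
  unfold Pre_tokenize_line_with_angle_brackets; infer_instance

def pvWitness_tokenize_line_with_angle_brackets : String := "a <b> <c d> <e"

def Spec_tokenize_line_with_angle_brackets (line : String) (out : List String) : Prop :=
  out = tokenize_line_with_angle_brackets_alt line
instance (line : String) (out : List String) : Decidable (Spec_tokenize_line_with_angle_brackets line out) := by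
  unfold Spec_tokenize_line_with_angle_brackets; infer_instance

-- ===== CLAIM (what is proved, stated in full; the proofs are below) =====
def Claim_equal_tokenize_line_with_angle_brackets : Prop :=
  ∀ (line : String), Dom_tokenize_line_with_angle_brackets line →
    Pre_tokenize_line_with_angle_brackets line →
    Spec_tokenize_line_with_angle_brackets line (tokenize_line_with_angle_brackets line)

-- ===== LEMMAS AND PROOFS =====

theorem tokBGo_succ (f : Nat) (cs : List Char) :
    tokBGo (f + 1) cs = match cs.dropWhile (· ≠ '<') with
      | [] => []
      | _ :: after =>
        match after.dropWhile (· ≠ '>') with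
        | [] => []
        | _ :: after2 => String.ofList (after.takeWhile (· ≠ '>')) :: tokBGo f after2 := rfl

-- fuel irrelevance: any fuel beyond the remaining length gives the same result
theorem tokBGo_congr : ∀ (f g : Nat) (l : List Char),
    l.length < f → l.length < g → tokBGo f l = tokBGo g l := by
  intro f
  induction f with
  | zero => intro g l h _; omega
  | succ f ih =>
    intro g l hf hg
    cases g with
    | zero => omega
    | succ g =>
      rw [tokBGo_succ, tokBGo_succ]
      cases h1 : l.dropWhile (· ≠ '<') with
      | nil => rfl
      | cons x after =>
        show (match after.dropWhile (· ≠ '>') with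
            | [] => []
            | _ :: after2 => String.ofList (after.takeWhile (· ≠ '>')) :: tokBGo f after2)
          = (match after.dropWhile (· ≠ '>') with
            | [] => []
            | _ :: after2 => String.ofList (after.takeWhile (· ≠ '>')) :: tokBGo g after2)
        cases h2 : after.dropWhile (· ≠ '>') with
        | nil => rfl
        | cons y after2 =>
          have hL1 := List.length_dropWhile_le (· ≠ '<') l
          have hL2 := List.length_dropWhile_le (· ≠ '>') after
          rw [h1] at hL1; rw [h2] at hL2
          simp only [List.length_cons] at hL1 hL2
          exact congrArg _ (ih g after2 (by omega) (by omega))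

-- "B from here on": tokBGo with always-sufficient fuel
def pvBof (l : List Char) : List String := tokBGo (l.length + 1) l

-- B mid-iteration, after the opening '<' has been consumed
def pvBofOpen (l : List Char) : List String :=
  match l.dropWhile (· ≠ '>') with
  | [] => []
  | _ :: after2 => String.ofList (l.takeWhile (· ≠ '>')) :: pvBof after2

theorem pvBof_nil : pvBof [] = [] := rfl

theorem pvBof_cons_skip (c : Char) (l : List Char) (hc : c ≠ '<') :
    pvBof (c :: l) = pvBof l := by
  have step : ∀ f, tokBGo (f + 1) (c :: l) = tokBGo (f + 1) l := by
    intro f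
    rw [tokBGo_succ, tokBGo_succ, List.dropWhile_cons]
    simp [hc]
  calc pvBof (c :: l) = tokBGo (l.length + 2) (c :: l) := rfl
    _ = tokBGo (l.length + 2) l := step _
    _ = pvBof l := tokBGo_congr _ _ _ (by omega) (by omega)

theorem pvBof_cons_lt (l : List Char) : pvBof ('<' :: l) = pvBofOpen l := by
  have hd : ('<' :: l).dropWhile (· ≠ '<') = '<' :: l := by simp
  show tokBGo (l.length + 2) ('<' :: l) = pvBofOpen l
  rw [tokBGo_succ, hd]
  show (match l.dropWhile (· ≠ '>') with
      | [] => []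
      | _ :: after2 => String.ofList (l.takeWhile (· ≠ '>')) :: tokBGo (l.length + 1) after2)
    = pvBofOpen l
  unfold pvBofOpen
  cases h2 : l.dropWhile (· ≠ '>') with
  | nil => rfl
  | cons y after2 =>
    have hL2 := List.length_dropWhile_le (· ≠ '>') l
    rw [h2] at hL2
    simp only [List.length_cons] at hL2
    exact congrArg _ (tokBGo_congr _ _ _ (by omega) (by omega))

def pvExtract : Option (List String × Int × Bool) → List String
  | some (tokens, _, _) => tokens
  | none => []

-- the main loop invariant: A's fold from index a equals the tokens so far followed by
-- B's tokenisation of the rest (mid-token when opened, with cur pointing past the '<')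
theorem pvLoopMain (cs : List Char) :
    ∀ (s : List Char) (a cur : Nat) (tokens : List String) (opened : Bool) (t : List Char),
      cs.drop a = s → a ≤ cs.length → cur ≤ a →
      (opened = true → cs.drop cur = t ++ s ∧ ∀ c ∈ t, pvIsBr c = false) →
      pvAltChain opened (s.filter pvIsBr) = true →
      pvExtract ((PySem.List.pyRange (a : Int) (cs.length : Int) 1).foldl (tokAStep cs)
          (some (tokens, (cur : Int), opened)))
        = tokens ++ (if opened then pvBofOpen (cs.drop cur) else pvBof s) := by
  intro s
  induction s with
  | nil =>
    intro a cur tokens opened t hdrop ha hcur hop hchain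
    have han : a = cs.length := by
      have := List.length_drop (l := cs) (i := a); rw [hdrop] at this; simp at this; omega
    rw [han, PySem.List.pyRange_one_eq_nil le_rfl]
    simp only [List.foldl_nil, pvExtract]
    cases opened with
    | false => simp [pvBof_nil]
    | true =>
      obtain ⟨ht, hnb⟩ := hop rfl
      simp only [List.append_nil] at ht
      have : (cs.drop cur).dropWhile (· ≠ '>') = [] := by
        rw [List.dropWhile_eq_nil_iff]
        intro x hx
        have := hnb x (ht ▸ hx)
        simp [pvIsBr] at this
        simp [this.2]
      rw [if_pos rfl]
      unfold pvBofOpen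
      rw [this]
      simp
  | cons c s' ih =>
    intro a cur tokens opened t hdrop ha hcur hop hchain
    have han : a < cs.length := by
      by_contra h
      rw [List.drop_eq_nil_of_le (by omega)] at hdrop
      simp at hdrop
    have hget : cs[a] = c := by
      rw [List.drop_eq_getElem_cons han] at hdrop
      exact (List.cons.injEq _ _ _ _ ▸ hdrop).1
    have hdrop' : cs.drop (a + 1) = s' := by
      rw [List.drop_eq_getElem_cons han] at hdrop
      exact (List.cons.injEq _ _ _ _ ▸ hdrop).2
    have hrange : PySem.List.pyRange (a : Int) (cs.length : Int) 1
        = (a : Int) :: PySem.List.pyRange ((a : Int) + 1) (cs.length : Int) 1 :=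
      PySem.List.pyRange_one_cons (by exact_mod_cast han)
    have hgetD : PySem.List.pyGetD cs (a : Int) ' ' = c := by
      rw [PySem.List.pyGetD_natCast, List.getD_eq_getElem?_getD, List.getElem?_eq_getElem han,
        hget, Option.getD_some]
    rw [hrange, List.foldl_cons]
    have hcast : ((a : Int) + 1) = ((a + 1 : Nat) : Int) := by push_cast; ring
    by_cases hlt : c = '<'
    · cases opened with
      | true =>
        exfalso
        rw [← hdrop'] at hchain
        subst hlt
        simp [pvAltChain, pvIsBr, hdrop'] at hchain
      | false =>
        have hstep : tokAStep cs (some (tokens, (cur : Int), false)) (a : Int)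
            = some (tokens, (a : Int) + 1, true) := by
          simp [tokAStep, hgetD, hlt]
        rw [hstep, hcast]
        rw [ih (a + 1) (a + 1) tokens true [] hdrop' (by omega) le_rfl
          (fun _ => ⟨by simp [hdrop'], by simp⟩)
          (by subst hlt; simpa [pvAltChain, pvIsBr] using hchain)]
        subst hlt
        simp [pvBof_cons_lt, hdrop']
    · by_cases hgt : c = '>'
      · cases opened with
        | false =>
          exfalso
          subst hgt
          simp [pvAltChain, pvIsBr] at hchain
        | true =>
          obtain ⟨ht, hnb⟩ := hop rfl
          -- the emitted token is exactly t
          have htlen : t.length = a - cur := by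
            have h1 := congrArg List.length ht
            simp only [List.length_drop, List.length_append, List.length_cons] at h1
            have h2 := congrArg List.length hdrop'
            simp only [List.length_drop] at h2
            omega
          have hslice : PySem.List.slice cs (some (cur : Int)) (some (a : Int))
              = t := by
            rw [PySem.List.slice_natCast, ← htlen, ht, List.take_left]
          have hstep : tokAStep cs (some (tokens, (cur : Int), true)) (a : Int)
              = some (tokens ++ [String.ofList t], (cur : Int), false) := by
            simp [tokAStep, hgetD, hgt, hslice]
          rw [hstep, hcast]
          rw [ih (a + 1) cur (tokens ++ [String.ofList t]) false t hdrop' (by omega) (by omega)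
            (by intro h; exact absurd h (by simp))
            (by subst hgt; simpa [pvAltChain, pvIsBr] using hchain)]
          have hallt : ∀ x ∈ t, (decide (x ≠ '>')) = true := by
            intro x hx
            have := hnb x hx
            simp [pvIsBr] at this
            simp [this.2]
          have hdwt : t.dropWhile (· ≠ '>') = [] :=
            List.dropWhile_eq_nil_iff.mpr (fun x hx => by simpa using hallt x hx)
          have htwt : t.takeWhile (· ≠ '>') = t :=
            List.takeWhile_eq_self_iff.mpr (fun x hx => by simpa using hallt x hx)
          have hdw : (cs.drop cur).dropWhile (· ≠ '>') = '>' :: s' := by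
            subst hgt
            rw [ht, List.dropWhile_append, hdwt]
            simp
          have htw : (cs.drop cur).takeWhile (· ≠ '>') = t := by
            subst hgt
            rw [ht, List.takeWhile_append, htwt]
            simp
          rw [if_pos rfl]
          unfold pvBofOpen
          rw [hdw, htw]
          simp
      · -- ordinary character: state unchanged
        have hstep : tokAStep cs (some (tokens, (cur : Int), opened)) (a : Int)
            = some (tokens, (cur : Int), opened) := by
          cases opened <;> simp [tokAStep, hgetD, hlt, hgt]
        rw [hstep, hcast]
        have hchain' : pvAltChain opened (s'.filter pvIsBr) = true := by
          have : pvIsBr c = false := by simp [pvIsBr, hlt, hgt]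
          simpa [this] using hchain
        cases opened with
        | false =>
          rw [ih (a + 1) cur tokens false t hdrop' (by omega) (by omega)
            (by intro h; exact absurd h (by simp)) hchain']
          rw [pvBof_cons_skip c s' hlt]
        | true =>
          obtain ⟨ht, hnb⟩ := hop rfl
          rw [ih (a + 1) cur tokens true (t ++ [c]) hdrop' (by omega) (by omega)
            (fun _ => ⟨by rw [ht]; simp, by
              intro x hx
              rcases List.mem_append.mp hx with h | h
              · exact hnb x h
              · simp only [List.mem_singleton] at h
                subst h; simp [pvIsBr, hlt, hgt]⟩) hchain']
          simp

-- ===== VERDICT (by name: the statement is the Claim_ definition above) =====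
theorem tokenize_line_with_angle_brackets_spec : Claim_equal_tokenize_line_with_angle_brackets := by
  intro line _ hpre
  unfold Spec_tokenize_line_with_angle_brackets
  unfold tokenize_line_with_angle_brackets tokenize_line_with_angle_brackets_alt
  have h := pvLoopMain line.toList line.toList 0 0 [] false []
    (by simp) (by omega) le_rfl (by intro h; exact absurd h (by simp)) hpre
  simp only [Nat.cast_zero, if_neg (Bool.false_ne_true), List.nil_append] at h
  exact h
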